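-- pv_equiv track=rewrite | github.com/pakhunchan/board-knights-quest | game-music/music_gen.py | make_chord
-- ===== SOURCE A (Python) =====
-- def make_chord(root, chord_type="major", inversion=0):
--     """Create a chord from root note."""
--     intervals = {
--         "major": [0, 4, 7],
--         "minor": [0, 3, 7],
--         "sus2": [0, 2, 7],
--         "sus4": [0, 5, 7],
--         "maj7": [0, 4, 7, 11],
--         "min7": [0, 3, 7, 10],
--         "add9": [0, 4, 7, 14],
--     }
--     chord = [root + i for i in intervals.get(chord_type, intervals["major"])]
--     # Apply inversion
--     for i in range(inversion):
--         chord[i % len(chord)] += 12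
--     return chord
-- ===== SOURCE B (Python) =====
-- def make_chord(root, chord_type="major", inversion=0):
--     """Create a chord from root note."""
--     intervals = {
--         "major": [0, 4, 7],
--         "minor": [0, 3, 7],
--         "sus2": [0, 2, 7],
--         "sus4": [0, 5, 7],
--         "maj7": [0, 4, 7, 11],
--         "min7": [0, 3, 7, 10],
--         "add9": [0, 4, 7, 14],
--     }
--     chord = [root + i for i in intervals.get(chord_type, intervals["major"])]
--     # Closed-form inversion: full rounds raise every note an octave, the
--     # remainder raises only the first r notes (negative inversion is a no-op).
--     q, r = divmod(max(inversion, 0), len(chord))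
--     return [c + 12 * (q + (1 if j < r else 0)) for j, c in enumerate(chord)]
-- ===== Notes on version B (the rewrite author's own statement) =====
-- stated objective: simpler
-- what changed: The per-step inversion loop (one +12 per range(inversion) iteration, cycling through the chord) is replaced by a closed-form divmod octave shift applied to every note in one comprehension.
import Mathlib
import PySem

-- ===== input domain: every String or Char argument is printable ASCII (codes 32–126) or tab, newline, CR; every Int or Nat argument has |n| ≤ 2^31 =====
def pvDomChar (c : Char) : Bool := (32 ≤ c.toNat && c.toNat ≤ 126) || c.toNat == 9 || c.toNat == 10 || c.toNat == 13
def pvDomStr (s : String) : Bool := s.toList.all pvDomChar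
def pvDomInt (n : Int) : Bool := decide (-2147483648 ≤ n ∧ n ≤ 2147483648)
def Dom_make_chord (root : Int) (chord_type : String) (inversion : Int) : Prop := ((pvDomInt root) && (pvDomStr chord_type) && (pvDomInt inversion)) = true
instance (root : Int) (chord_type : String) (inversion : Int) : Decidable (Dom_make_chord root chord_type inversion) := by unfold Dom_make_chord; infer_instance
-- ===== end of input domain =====

-- B replaces A's per-step inversion loop by a closed-form divmod octave shift (simpler, O(len(chord)) instead of O(inversion)).

-- ===== PORT A =====
def pvIntervals : PySem.Dict String (List Int) :=
  PySem.Dict.ofList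
    [("major", [0, 4, 7]), ("minor", [0, 3, 7]), ("sus2", [0, 2, 7]), ("sus4", [0, 5, 7]),
     ("maj7", [0, 4, 7, 11]), ("min7", [0, 3, 7, 10]), ("add9", [0, 4, 7, 14])]

-- intervals["major"]: "major" is a literal key of the literal dict, so get? is some; .getD [] only unwraps it
def make_chord (root : Int) (chord_type : String) (inversion : Int) : List Int :=
  let chord := (PySem.Dict.getD pvIntervals chord_type ((PySem.Dict.get? pvIntervals "major").getD [])).map (fun i => root + i)
  (PySem.List.pyRange 0 inversion 1).foldl
    (fun c i => c.modify (PySem.Int.mod i (c.length : Int)).toNat (· + 12)) chord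

-- ===== PORT B =====
def make_chord_alt (root : Int) (chord_type : String) (inversion : Int) : List Int :=
  let chord := (PySem.Dict.getD pvIntervals chord_type ((PySem.Dict.get? pvIntervals "major").getD [])).map (fun i => root + i)
  let q := PySem.Int.floordiv (max inversion 0) (chord.length : Int)
  let r := PySem.Int.mod (max inversion 0) (chord.length : Int)
  (PySem.List.enumerate chord 0).map (fun p => p.2 + 12 * (q + (if p.1 < r then 1 else 0)))

-- ===== PRECONDITION & SPEC =====
def Spec_make_chord (root : Int) (chord_type : String) (inversion : Int) (out : List Int) : Prop := out = make_chord_alt root chord_type inversion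
instance (root : Int) (chord_type : String) (inversion : Int) (out : List Int) : Decidable (Spec_make_chord root chord_type inversion out) := by unfold Spec_make_chord; infer_instance

-- ===== CLAIM (what is proved, stated in full; the proofs are below) =====
def Claim_equal_make_chord : Prop := ∀ (root : Int) (chord_type : String) (inversion : Int), Dom_make_chord root chord_type inversion → Spec_make_chord root chord_type inversion (make_chord root chord_type inversion)

-- ===== LEMMAS AND PROOFS =====

-- A's loop over range(m) on a 3-element chord, in closed form
lemma loop3 (m : Nat) (a b c : Int) :
    (PySem.List.pyRange 0 (m : Int) 1).foldl
      (fun c i => c.modify (PySem.Int.mod i (c.length : Int)).toNat (· + 12)) [a, b, c]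
    = [a + 12 * ((m / 3 : Nat) : Int) + (if 0 < m % 3 then 12 else 0),
       b + 12 * ((m / 3 : Nat) : Int) + (if 1 < m % 3 then 12 else 0),
       c + 12 * ((m / 3 : Nat) : Int)] := by
  induction m with
  | zero => simp
  | succ m ih =>
    have hsplit : PySem.List.pyRange 0 ((m + 1 : Nat) : Int) 1
        = PySem.List.pyRange 0 (m : Int) 1 ++ [(m : Int)] := by
      push_cast
      exact PySem.List.pyRange_one_succ_right (by positivity)
    rw [hsplit, List.foldl_append, ih]
    have hmod : (((m : Int)) % 3).toNat = m % 3 := by omega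
    simp only [List.foldl_cons, List.foldl_nil]
    norm_num
    have h3 : m % 3 = 0 ∨ m % 3 = 1 ∨ m % 3 = 2 := by omega
    rcases h3 with h | h | h <;>
      simp [hmod, h, List.modify, List.modifyTailIdx, List.modifyTailIdx.go,
        List.cons.injEq] <;> omega

-- A's loop over range(m) on a 4-element chord, in closed form
lemma loop4 (m : Nat) (a b c d : Int) :
    (PySem.List.pyRange 0 (m : Int) 1).foldl
      (fun c i => c.modify (PySem.Int.mod i (c.length : Int)).toNat (· + 12)) [a, b, c, d]
    = [a + 12 * ((m / 4 : Nat) : Int) + (if 0 < m % 4 then 12 else 0),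
       b + 12 * ((m / 4 : Nat) : Int) + (if 1 < m % 4 then 12 else 0),
       c + 12 * ((m / 4 : Nat) : Int) + (if 2 < m % 4 then 12 else 0),
       d + 12 * ((m / 4 : Nat) : Int)] := by
  induction m with
  | zero => simp
  | succ m ih =>
    have hsplit : PySem.List.pyRange 0 ((m + 1 : Nat) : Int) 1
        = PySem.List.pyRange 0 (m : Int) 1 ++ [(m : Int)] := by
      push_cast
      exact PySem.List.pyRange_one_succ_right (by positivity)
    rw [hsplit, List.foldl_append, ih]
    have hmod : (((m : Int)) % 4).toNat = m % 4 := by omega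
    simp only [List.foldl_cons, List.foldl_nil]
    norm_num
    have h4 : m % 4 = 0 ∨ m % 4 = 1 ∨ m % 4 = 2 ∨ m % 4 = 3 := by omega
    rcases h4 with h | h | h | h <;>
      simp [hmod, h, List.modify, List.modifyTailIdx, List.modifyTailIdx.go,
        List.cons.injEq] <;> omega


-- the literal dict admits only these seven base interval lists (default = major)
lemma base_cases (s : String) :
    PySem.Dict.getD pvIntervals s ((PySem.Dict.get? pvIntervals "major").getD [])
      = [0,4,7] ∨ PySem.Dict.getD pvIntervals s ((PySem.Dict.get? pvIntervals "major").getD []) = [0,3,7]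
      ∨ PySem.Dict.getD pvIntervals s ((PySem.Dict.get? pvIntervals "major").getD []) = [0,2,7]
      ∨ PySem.Dict.getD pvIntervals s ((PySem.Dict.get? pvIntervals "major").getD []) = [0,5,7]
      ∨ PySem.Dict.getD pvIntervals s ((PySem.Dict.get? pvIntervals "major").getD []) = [0,4,7,11]
      ∨ PySem.Dict.getD pvIntervals s ((PySem.Dict.get? pvIntervals "major").getD []) = [0,3,7,10]
      ∨ PySem.Dict.getD pvIntervals s ((PySem.Dict.get? pvIntervals "major").getD []) = [0,4,7,14] := by
  have hdef : (PySem.Dict.get? pvIntervals "major").getD ([] : List Int) = [0,4,7] := by decide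
  have hmk : pvIntervals = PySem.Dict.mk
    [("major", [0, 4, 7]), ("minor", [0, 3, 7]), ("sus2", [0, 2, 7]), ("sus4", [0, 5, 7]),
     ("maj7", [0, 4, 7, 11]), ("min7", [0, 3, 7, 10]), ("add9", [0, 4, 7, 14])] := by decide
  have hnil : (PySem.Dict.mk ([] : List (String × List Int))).get? s = none := rfl
  rw [hdef, hmk]
  simp only [PySem.Dict.getD_eq_get?_getD, PySem.Dict.get?_mk_cons, hnil]
  split_ifs <;> simp

-- A's loop on a 3-note chord equals B's enumerate/divmod comprehension
lemma case3 (inv a b c : Int) :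
    (PySem.List.pyRange 0 inv 1).foldl
      (fun c i => c.modify (PySem.Int.mod i (c.length : Int)).toNat (· + 12)) [a, b, c]
    = (PySem.List.enumerate [a, b, c] 0).map
        (fun p => p.2 + 12 * (PySem.Int.floordiv (max inv 0) (([a, b, c] : List Int).length : Int) + (if p.1 < PySem.Int.mod (max inv 0) (([a, b, c] : List Int).length : Int) then 1 else 0))) := by
  have hm : max inv 0 = ((inv.toNat : Nat) : Int) := by omega
  have hr : PySem.List.pyRange 0 inv 1 = PySem.List.pyRange 0 ((inv.toNat : Nat) : Int) 1 := by
    rcases le_or_gt 0 inv with h | h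
    · rw [Int.toNat_of_nonneg h]
    · rw [PySem.List.pyRange_one_eq_nil (by omega), PySem.List.pyRange_one_eq_nil (by omega)]
  rw [hr, loop3, hm]
  simp [PySem.List.enumerate, List.cons.injEq]
  split_ifs <;> omega

-- A's loop on a 4-note chord equals B's enumerate/divmod comprehension
lemma case4 (inv a b c d : Int) :
    (PySem.List.pyRange 0 inv 1).foldl
      (fun c i => c.modify (PySem.Int.mod i (c.length : Int)).toNat (· + 12)) [a, b, c, d]
    = (PySem.List.enumerate [a, b, c, d] 0).map
        (fun p => p.2 + 12 * (PySem.Int.floordiv (max inv 0) (([a, b, c, d] : List Int).length : Int) + (if p.1 < PySem.Int.mod (max inv 0) (([a, b, c, d] : List Int).length : Int) then 1 else 0))) := by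
  have hm : max inv 0 = ((inv.toNat : Nat) : Int) := by omega
  have hr : PySem.List.pyRange 0 inv 1 = PySem.List.pyRange 0 ((inv.toNat : Nat) : Int) 1 := by
    rcases le_or_gt 0 inv with h | h
    · rw [Int.toNat_of_nonneg h]
    · rw [PySem.List.pyRange_one_eq_nil (by omega), PySem.List.pyRange_one_eq_nil (by omega)]
  rw [hr, loop4, hm]
  simp [PySem.List.enumerate, List.cons.injEq]
  split_ifs <;> omega

-- ===== VERDICT (by name: the statement is the Claim_ definition above) =====
theorem make_chord_spec : Claim_equal_make_chord := by
  intro root ct inv _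
  unfold Spec_make_chord make_chord make_chord_alt
  rcases base_cases ct with h | h | h | h | h | h | h <;>
    rw [h] <;>
    simp only [List.map_cons, List.map_nil] <;>
    first
      | exact case3 inv _ _ _
      | exact case4 inv _ _ _ _
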